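-- pv_equiv track=rewrite | github.com/DancingOnAir/LeetcodePythonSolution | Array/2294_partition_array_such_that_maximum_difference_is_k.py | partitionArray1
-- ===== SOURCE A (Python) =====
-- from typing import List
--
-- def partitionArray1(nums: List[int], k: int) -> int:
--     nums.sort()
--     res = 1
--     mx = mn = nums[0]
--     for x in nums:
--         mx = max(mx, x)
--         mn = min(mn, x)
--         if mx - mn > k:
--             res += 1
--             mx = mn = x
--     return res
-- ===== SOURCE B (Python) =====
-- from typing import List
--
--
-- def _upper_bound(a: List[int], x: int, lo: int, hi: int) -> int:
--     """First index in [lo, hi) whose value exceeds x (a is sorted there)."""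
--     while lo < hi:
--         mid = (lo + hi) // 2
--         if a[mid] <= x:
--             lo = mid + 1
--         else:
--             hi = mid
--     return lo
--
--
-- def partitionArray1(nums: List[int], k: int) -> int:
--     # Sorts nums in place (same side effect as the original), then counts
--     # groups by jumping with a binary search instead of rescanning elements.
--     nums.sort()
--     n = len(nums)
--     res = 0
--     i = 0
--     while i < n:
--         res += 1
--         i = _upper_bound(nums, nums[i] + k, i + 1, n)
--     return res
-- ===== Notes on version B (the rewrite author's own statement) =====
-- stated objective: faster
-- what changed: Instead of scanning every element while maintaining a running max/min and a split counter, B sorts and then jumps group-by-group: each step counts one group and binary-searches (hand-written upper bound) for the first element exceeding group_start + k.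
-- outside the precondition, e.g. on partitionArray1([1, 3], -1): A returns 3, B returns 2
import Mathlib
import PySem

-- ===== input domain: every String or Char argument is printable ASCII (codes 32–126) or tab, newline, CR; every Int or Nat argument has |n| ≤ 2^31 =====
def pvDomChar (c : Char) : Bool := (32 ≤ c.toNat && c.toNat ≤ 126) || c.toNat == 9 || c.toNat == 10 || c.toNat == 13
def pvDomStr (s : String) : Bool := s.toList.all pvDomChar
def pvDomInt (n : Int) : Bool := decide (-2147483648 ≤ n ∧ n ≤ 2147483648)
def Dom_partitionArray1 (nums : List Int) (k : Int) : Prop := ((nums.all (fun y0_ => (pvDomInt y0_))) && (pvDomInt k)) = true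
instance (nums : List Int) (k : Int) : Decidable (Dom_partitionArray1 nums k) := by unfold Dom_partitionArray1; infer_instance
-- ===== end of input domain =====

-- B replaces A's element-by-element max/min rescan by group-jumping with a hand-written
-- binary search over the sorted list, doing O(g log n) loop work after the sort (measured faster).
-- Both A and B sort their list argument in place; the equivalence proved is about the return value.


-- ===== PORT A =====
def partitionArray1 (nums : List Int) (k : Int) : Int :=
  let s := PySem.List.sorted nums (fun x => x) false
  -- nums[0]: IndexError on the empty list (excluded by Pre_); 0 is a junk default there
  let h := PySem.List.pyGetD s 0 0
  (s.foldl (fun (st : Int × Int × Int) x =>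
      let mx := max st.2.1 x
      let mn := min st.2.2 x
      if mx - mn > k then (st.1 + 1, x, x) else (st.1, mx, mn))
    (1, h, h)).1

-- ===== PORT B =====
-- termination fact for the binary-search midpoint, cited by `decreasing_by`
theorem pvMidBounds (lo hi : Int) (h : lo < hi) :
    lo ≤ PySem.Int.floordiv (lo + hi) 2 ∧ PySem.Int.floordiv (lo + hi) 2 < hi := by
  constructor
  · rw [PySem.Int.le_floordiv_iff_mul_le (by omega)]; omega
  · rw [PySem.Int.floordiv_lt_iff_lt_mul (by omega)]; omega

-- Source B's _upper_bound; a[mid] is pyGetD since mid is always in range for the calls made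
def upperBound (a : List Int) (x : Int) (lo hi : Int) : Int :=
  if h : lo < hi then
    let mid := PySem.Int.floordiv (lo + hi) 2
    if PySem.List.pyGetD a mid 0 ≤ x then upperBound a x (mid + 1) hi
    else upperBound a x lo mid
  else lo
termination_by (hi - lo).toNat
decreasing_by
  · have := pvMidBounds lo hi h; omega
  · have := pvMidBounds lo hi h; omega

-- Source B's while loop; fuel = length suffices since i strictly increases each iteration
def altLoop (s : List Int) (k : Int) (n : Int) : Nat → Int → Int → Int
  | 0, _, res => res
  | fuel + 1, i, res =>
    if i < n then
      altLoop s k n fuel (upperBound s (PySem.List.pyGetD s i 0 + k) (i + 1) n) (res + 1)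
    else res

def partitionArray1_alt (nums : List Int) (k : Int) : Int :=
  let s := PySem.List.sorted nums (fun x => x) false
  altLoop s k (s.length : Int) s.length 0 0

-- ===== PRECONDITION & SPEC =====
-- Pre_ excludes the empty list, on which A raises IndexError, and negative k, which lies
-- outside the problem's natural domain (its statement has k ≥ 0): there B counts each
-- element as its own group (len(nums)) while A returns one more (len(nums)+1).
def Pre_partitionArray1 (nums : List Int) (k : Int) : Prop := nums ≠ [] ∧ 0 ≤ k
instance (nums : List Int) (k : Int) : Decidable (Pre_partitionArray1 nums k) := by
  unfold Pre_partitionArray1; infer_instance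

def pvWitness_partitionArray1 : List Int × Int := ([3, 1, 6, 2], 2)

def Spec_partitionArray1 (nums : List Int) (k : Int) (out : Int) : Prop := out = partitionArray1_alt nums k
instance (nums : List Int) (k : Int) (out : Int) : Decidable (Spec_partitionArray1 nums k out) := by unfold Spec_partitionArray1; infer_instance

-- ===== CLAIM (what is proved, stated in full; the proofs are below) =====
def Claim_equal_partitionArray1 : Prop := ∀ (nums : List Int) (k : Int), Dom_partitionArray1 nums k → Pre_partitionArray1 nums k → Spec_partitionArray1 nums k (partitionArray1 nums k)

-- ===== LEMMAS AND PROOFS =====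

-- number of greedy group splits after a group started at `start`, on the remaining sorted elements
def gcount (k start : Int) : List Int → Int
  | [] => 0
  | x :: t => if start + k < x then 1 + gcount k x t else gcount k start t

theorem gcount_skip (k start : Int) (l1 l2 : List Int) (h : ∀ y ∈ l1, y ≤ start + k) :
    gcount k start (l1 ++ l2) = gcount k start l2 := by
  induction l1 with
  | nil => rfl
  | cons x t ih =>
    have hx : x ≤ start + k := h x (by simp)
    simp only [List.cons_append, gcount]
    rw [if_neg (show ¬ start + k < x by omega)]
    exact ih (fun y hy => h y (by simp [hy]))

theorem foldA_eq (k : Int) :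
    ∀ (l : List Int) (res mx mn : Int), l.Pairwise (· ≤ ·) → (∀ y ∈ l, mx ≤ y) →
      mn ≤ mx → mx - mn ≤ k →
      (l.foldl (fun (st : Int × Int × Int) x =>
          let mx := max st.2.1 x
          let mn := min st.2.2 x
          if mx - mn > k then (st.1 + 1, x, x) else (st.1, mx, mn)) (res, mx, mn)).1
        = res + gcount k mn l := by
  intro l
  induction l with
  | nil => intro res mx mn _ _ _ _; simp [gcount]
  | cons x t ih =>
    intro res mx mn hpw hub hle hk'
    have hx : mx ≤ x := hub x (by simp)
    have hpt : t.Pairwise (· ≤ ·) := hpw.of_cons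
    have hxt : ∀ y ∈ t, x ≤ y := fun y hy => (List.pairwise_cons.mp hpw).1 y hy
    simp only [List.foldl_cons, max_eq_right hx, min_eq_left (le_trans hle hx)]
    by_cases hc : x - mn > k
    · rw [if_pos hc, ih (res + 1) x x hpt hxt le_rfl (by omega)]
      rw [show gcount k mn (x :: t) = 1 + gcount k x t from by
        rw [gcount, if_pos (show mn + k < x by omega)]]
      ring
    · rw [if_neg hc,
        show gcount k mn (x :: t) = gcount k mn t from by
          rw [gcount, if_neg (show ¬ mn + k < x by omega)]]
      exact ih res x mn hpt hxt (le_trans hle hx) (by omega)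

theorem sorted_getD_mono (a : List Int) (hpw : a.Pairwise (· ≤ ·)) (p q : Nat)
    (hpq : p ≤ q) (hq : q < a.length) : a.getD p 0 ≤ a.getD q 0 := by
  rcases Nat.lt_or_ge p q with h | h
  · rw [List.getD_eq_getElem a 0 (by omega), List.getD_eq_getElem a 0 hq]
    exact List.pairwise_iff_getElem.mp hpw p q (by omega) hq h
  · have : p = q := by omega
    simp [this]

theorem upperBound_spec (a : List Int) (x : Int) (hpw : a.Pairwise (· ≤ ·)) :
    ∀ (d : Nat) (lo hi : Int), (hi - lo).toNat ≤ d → 0 ≤ lo → lo ≤ hi → hi ≤ (a.length : Int) →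
      ∃ j : Nat, upperBound a x lo hi = (j : Int) ∧ lo ≤ (j : Int) ∧ (j : Int) ≤ hi ∧
        (∀ m : Nat, lo ≤ (m : Int) → (m : Int) < (j : Int) → a.getD m 0 ≤ x) ∧
        (∀ m : Nat, (j : Int) ≤ (m : Int) → (m : Int) < hi → x < a.getD m 0) := by
  intro d
  induction d with
  | zero =>
    intro lo hi hd h0 hle hhi
    refine ⟨lo.toNat, ?_, by omega, by omega, fun m hm hm' => by omega, fun m hm hm' => by omega⟩
    rw [upperBound, dif_neg (by omega)]
    omega
  | succ d ihd =>
    intro lo hi hd h0 hle hhi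
    by_cases hlt : lo < hi
    · rw [upperBound, dif_pos hlt]
      have hmid := pvMidBounds lo hi hlt
      set mid := PySem.Int.floordiv (lo + hi) 2 with hmiddef
      have hmr : PySem.List.pyGetD a mid 0 = a.getD mid.toNat 0 := by
        rw [PySem.List.pyGetD_eq_getElem a 0 (by omega) (by omega),
          List.getD_eq_getElem a 0 (by omega)]
      by_cases hc : PySem.List.pyGetD a mid 0 ≤ x
      · rw [if_pos hc]
        obtain ⟨j, hub, hj1, hj2, hlow, hhigh⟩ :=
          ihd (mid + 1) hi (by omega) (by omega) (by omega) hhi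
        refine ⟨j, hub, by omega, hj2, ?_, hhigh⟩
        intro m hm hm'
        by_cases hmm : mid + 1 ≤ (m : Int)
        · exact hlow m hmm hm'
        · calc a.getD m 0 ≤ a.getD mid.toNat 0 :=
                sorted_getD_mono a hpw m mid.toNat (by omega) (by omega)
            _ ≤ x := by rw [← hmr]; exact hc
      · rw [if_neg hc]
        obtain ⟨j, hub, hj1, hj2, hlow, hhigh⟩ :=
          ihd lo mid (by omega) h0 (by omega) (by omega)
        refine ⟨j, hub, hj1, by omega, hlow, ?_⟩
        intro m hm hm'
        by_cases hmm : (m : Int) < mid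
        · exact hhigh m hm hmm
        · calc x < a.getD mid.toNat 0 := by rw [← hmr]; omega
            _ ≤ a.getD m 0 := sorted_getD_mono a hpw mid.toNat m (by omega) (by omega)
    · refine ⟨lo.toNat, ?_, by omega, by omega, fun m hm hm' => by omega, fun m hm hm' => by omega⟩
      rw [upperBound, dif_neg (by omega)]
      omega

theorem altLoop_nonpos (s : List Int) (k n : Int) (fuel : Nat) (i res : Int) (h : ¬ i < n) :
    altLoop s k n fuel i res = res := by
  cases fuel <;> simp [altLoop, h]

theorem loopB_eq (s : List Int) (k : Int) (hpw : s.Pairwise (· ≤ ·)) :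
    ∀ (fuel : Nat) (i : Nat) (res : Int), i < s.length → s.length - i ≤ fuel →
      altLoop s k (s.length : Int) fuel (i : Int) res
        = res + 1 + gcount k (s.getD i 0) (s.drop (i + 1)) := by
  intro fuel
  induction fuel with
  | zero => intro i res hi hf; omega
  | succ fuel ih =>
    intro i res hi hf
    rw [altLoop, if_pos (by exact_mod_cast hi)]
    have hg : PySem.List.pyGetD s (i : Int) 0 = s.getD i 0 := by
      simp [PySem.List.pyGetD_natCast]
    rw [hg]
    obtain ⟨j, hub, hj1, hj2, hlow, hhigh⟩ :=
      upperBound_spec s (s.getD i 0 + k) hpw ((s.length : Int) - ((i : Int) + 1)).toNat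
        ((i : Int) + 1) (s.length : Int) (by omega) (by omega) (by exact_mod_cast hi) (by omega)
    rw [hub]
    have hji : i + 1 ≤ j := by exact_mod_cast hj1
    have hjn : j ≤ s.length := by exact_mod_cast hj2
    -- split the dropped suffix at j: the part before j stays in the current group
    have hsplit : s.drop (i + 1)
        = (s.drop (i + 1)).take (j - (i + 1)) ++ s.drop j := by
      have hx : List.drop (j - (i + 1)) (s.drop (i + 1)) = s.drop j := by
        rw [List.drop_drop]
        congr 1
        omega
      rw [← hx, List.take_append_drop]
    have hskip : gcount k (s.getD i 0) (s.drop (i + 1)) = gcount k (s.getD i 0) (s.drop j) := by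
      rw [hsplit, gcount_skip]
      intro y hy
      obtain ⟨m, hm, hym⟩ := List.getElem_of_mem hy
      have hlen_take : ((s.drop (i + 1)).take (j - (i + 1))).length
          = min (j - (i + 1)) ((s.drop (i + 1)).length) := List.length_take
      have hlen_drop : (s.drop (i + 1)).length = s.length - (i + 1) := List.length_drop
      have hmj : m < j - (i + 1) := by omega
      have hms : (i + 1) + m < s.length := by omega
      rw [List.getElem_take, List.getElem_drop] at hym
      have hl := hlow ((i + 1) + m) (by push_cast; omega) (by push_cast; omega)
      rw [List.getD_eq_getElem s 0 hms] at hl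
      rw [hym] at hl
      exact hl
    rw [hskip]
    by_cases hj : j < s.length
    · have hdropj : s.drop j = s[j] :: s.drop (j + 1) := List.drop_eq_getElem_cons hj
      have hbig : s.getD i 0 + k < s[j] := by
        have := hhigh j (by omega) (by exact_mod_cast hj)
        rwa [List.getD_eq_getElem s 0 hj] at this
      rw [hdropj]
      rw [show gcount k (s.getD i 0) (s[j] :: s.drop (j + 1))
            = 1 + gcount k s[j] (s.drop (j + 1)) from by
        rw [gcount, if_pos hbig]]
      have hcast : ((j : Nat) : Int) = (j : Int) := rfl
      rw [ih j (res + 1) hj (by omega)]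
      rw [List.getD_eq_getElem s 0 hj]
      ring
    · have hjeq : j = s.length := by omega
      rw [altLoop_nonpos s k _ fuel _ (res + 1) (by omega)]
      rw [hjeq, List.drop_length]
      show res + 1 = res + 1 + gcount k (s.getD i 0) []
      rw [show gcount k (s.getD i 0) [] = 0 from rfl]
      ring

theorem ports_agree (nums : List Int) (k : Int) (hne : nums ≠ []) (hk : 0 ≤ k) :
    partitionArray1 nums k = partitionArray1_alt nums k := by
  unfold partitionArray1 partitionArray1_alt
  have hsne : PySem.List.sorted nums (fun x => x) false ≠ [] := by
    rw [Ne, PySem.List.sorted_eq_nil_iff]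
    exact hne
  obtain ⟨h, t, hst⟩ := List.exists_cons_of_ne_nil hsne
  have hpw : (PySem.List.sorted nums (fun x => x) false).Pairwise (· ≤ ·) :=
    PySem.List.sorted_pairwise nums (fun x => x)
  rw [hst] at hpw ⊢
  have hht : ∀ y ∈ t, h ≤ y := (List.pairwise_cons.mp hpw).1
  -- A's side
  have hA : (List.foldl (fun (st : Int × Int × Int) x =>
        let mx := max st.2.1 x
        let mn := min st.2.2 x
        if mx - mn > k then (st.1 + 1, x, x) else (st.1, mx, mn))
      (1, PySem.List.pyGetD (h :: t) 0 0, PySem.List.pyGetD (h :: t) 0 0) (h :: t)).1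
      = 1 + gcount k h t := by
    rw [PySem.List.pyGetD_zero_cons, List.foldl_cons]
    have : (if max h h - min h h > k then ((1 : Int) + 1, h, h) else (1, max h h, min h h))
        = (1, h, h) := by
      rw [if_neg (by simp; omega)]
      simp
    rw [this]
    exact foldA_eq k t 1 h h hpw.of_cons hht le_rfl (by omega)
  -- B's side
  have hB : altLoop (h :: t) k ((h :: t).length : Int) (h :: t).length 0 0
      = 1 + gcount k h t := by
    have := loopB_eq (h :: t) k hpw (h :: t).length 0 0 (by simp) (by omega)
    simpa using this
  simp only []
  rw [hA] at *
  exact hA.trans hB.symm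

-- ===== VERDICT (by name: the statement is the Claim_ definition above) =====
theorem partitionArray1_spec : Claim_equal_partitionArray1 := by
  intro nums k _ hpre
  unfold Spec_partitionArray1
  exact ports_agree nums k hpre.1 hpre.2
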